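-- pv_equiv track=rewrite | github.com/math-tools/math-objects | cvnum/tools/factory/de-textify/dsltr/rules/toolboxdsl.py | findquotes
-- ===== SOURCE A (Python) =====
-- TAG_DOUBLE_QUOTE   = '"'
--
-- TAG_CONTENT_GROUP  = "group"
--
-- DSL_ACTION_VERBATIM          = "verbatim"
--
-- def findquotes(text):
-- # An empty text.
--     if not text:
--         return [[DSL_ACTION_VERBATIM, '']]
--
-- # A none empty text.
--     pieces = text.split(TAG_DOUBLE_QUOTE)
--
-- # Good number of quotes?
--     if len(pieces) % 2 != 1:
--         raise Exception(f"bad number of quotes.")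
--
-- # Let's build the none empty parts.
--     parts     = []
--     isposeven = False
--
--     for onepart in pieces:
--         isposeven = not isposeven
--
--         if not onepart:
--             if not isposeven:
--                 raise Exception(f"empty quotes found.")
--
--             continue
--
--         context = DSL_ACTION_VERBATIM if isposeven else TAG_CONTENT_GROUP
--
--         parts.append((context, onepart))
--
--     return parts
-- ===== SOURCE B (Python) =====
-- TAG_DOUBLE_QUOTE   = '"'
-- TAG_CONTENT_GROUP  = "group"
-- DSL_ACTION_VERBATIM = "verbatim"
--
-- def findquotes(text):
--     # Empty text.
--     if not text:
--         return [[DSL_ACTION_VERBATIM, '']]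
--
--     # Parity check first (preserves error precedence of the original).
--     if text.count(TAG_DOUBLE_QUOTE) % 2 == 1:
--         raise Exception("bad number of quotes.")
--
--     # Single character scan with an in-quote flag and a buffer.
--     parts = []
--     buf = []
--     in_quote = False
--
--     for ch in text:
--         if ch == TAG_DOUBLE_QUOTE:
--             if in_quote:
--                 if not buf:
--                     raise Exception("empty quotes found.")
--                 parts.append((TAG_CONTENT_GROUP, ''.join(buf)))
--             else:
--                 if buf:
--                     parts.append((DSL_ACTION_VERBATIM, ''.join(buf)))
--             buf = []
--             in_quote = not in_quote
--         else:
--             buf.append(ch)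
--
--     if buf:
--         parts.append((DSL_ACTION_VERBATIM, ''.join(buf)))
--
--     return parts
-- ===== Notes on version B (the rewrite author's own statement) =====
-- stated objective: alternative
-- what changed: Replaces split-on-the-double-quote-then-classify-pieces-by-position with an upfront quote-parity check followed by a single character scan maintaining an in_quote flag and a buffer; no intermediate pieces list is built.
import Mathlib
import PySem

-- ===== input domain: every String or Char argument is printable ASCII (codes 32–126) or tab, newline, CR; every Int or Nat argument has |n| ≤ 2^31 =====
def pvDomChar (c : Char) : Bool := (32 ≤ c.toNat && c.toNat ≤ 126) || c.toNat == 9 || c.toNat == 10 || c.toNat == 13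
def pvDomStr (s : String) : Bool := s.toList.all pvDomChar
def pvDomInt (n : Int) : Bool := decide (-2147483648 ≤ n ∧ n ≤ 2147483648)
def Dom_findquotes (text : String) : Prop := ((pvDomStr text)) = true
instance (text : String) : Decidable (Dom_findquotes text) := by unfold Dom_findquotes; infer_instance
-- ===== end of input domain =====

-- B replaces A's split-then-classify-by-position with an upfront parity check plus a single
-- character scan (in_quote flag + buffer); same values, same cost (objective: alternative).


-- ===== PORT A =====
-- the for-loop over the split pieces; '[]' stands in for the 'empty quotes found.' raise (outside Pre_)
def findquotesLoop (pieces : List String) (isposeven : Bool) (parts : List (String × String)) :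
    List (String × String) :=
  match pieces with
  | [] => parts
  | p :: ps =>
    let e := !isposeven
    if p = "" then
      if e = false then []  -- the empty-quoted-group raise (outside Pre_)
      else findquotesLoop ps e parts
    else findquotesLoop ps e (parts ++ [((if e then "verbatim" else "group"), p)])

def findquotes (text : String) : List (String × String) :=
  if text = "" then [("verbatim", "")]
  else
    -- split? is always `some …` here: the separator is nonempty
    let pieces := (PySem.Str.split? text "\"").getD []
    if pieces.length % 2 ≠ 1 then []  -- the odd-quote-count raise (outside Pre_)
    else findquotesLoop pieces false []

-- ===== PORT B =====
-- the character scan; '[]' stands in for the 'empty quotes found.' raise (outside Pre_)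
def altScan (cs : List Char) (inq : Bool) (buf : List Char) (parts : List (String × String)) :
    List (String × String) :=
  match cs with
  | [] => if buf = [] then parts else parts ++ [("verbatim", String.ofList buf)]
  | c :: rest =>
    if c = '"' then
      if inq then
        if buf = [] then []  -- the empty-quoted-group raise (outside Pre_)
        else altScan rest false [] (parts ++ [("group", String.ofList buf)])
      else
        altScan rest true [] (parts ++ (if buf = [] then [] else [("verbatim", String.ofList buf)]))
    else altScan rest inq (buf ++ [c]) parts

def findquotes_alt (text : String) : List (String × String) :=
  if text = "" then [("verbatim", "")]
  else if PySem.Str.count text "\"" % 2 = 1 then []  -- the odd-quote-count raise (outside Pre_)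
  else altScan text.toList false [] []

-- ===== PRECONDITION & SPEC =====
-- Pre_ excludes exactly the inputs on which A raises: an even number of pieces (odd number of
-- quotes) or an empty odd-position (quoted-group) piece.
def Pre_findquotes (text : String) : Prop :=
  let ps := (PySem.Str.split? text "\"").getD []
  ps.length % 2 = 1 ∧ ∀ i ∈ List.range ps.length, i % 2 = 1 → ps.getD i "" ≠ ""
instance (text : String) : Decidable (Pre_findquotes text) := by unfold Pre_findquotes; infer_instance

def pvWitness_findquotes : String := "a\"b\"c"

def Spec_findquotes (text : String) (out : List (String × String)) : Prop := out = findquotes_alt text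
instance (text : String) (out : List (String × String)) : Decidable (Spec_findquotes text out) := by
  unfold Spec_findquotes; infer_instance

-- ===== CLAIM (what is proved, stated in full; the proofs are below) =====
def Claim_equal_findquotes : Prop :=
  ∀ (text : String), Dom_findquotes text → Pre_findquotes text → Spec_findquotes text (findquotes text)

-- ===== LEMMAS AND PROOFS =====

-- the pieces of splitting on '"', computed structurally
def fsplit : List Char → List (List Char)
  | [] => [[]]
  | c :: rest =>
    if c = '"' then [] :: fsplit rest
    else (c :: (fsplit rest).headI) :: (fsplit rest).tail

theorem fsplit_ne_nil (cs : List Char) : fsplit cs ≠ [] := by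
  cases cs with
  | nil => simp [fsplit]
  | cons c rest => simp only [fsplit]; split <;> simp

theorem fsplit_cons (cs : List Char) : (fsplit cs).headI :: (fsplit cs).tail = fsplit cs := by
  cases h : fsplit cs with
  | nil => exact absurd h (fsplit_ne_nil cs)
  | cons a l => simp

theorem splitOn_go_eq (fuel : Nat) :
    ∀ (cs cur : List Char) (acc : List (List Char)), cs.length < fuel →
      PySem.Chars.splitOn.go ['"'] fuel cs cur acc
        = acc.reverse ++ (cur.reverse ++ (fsplit cs).headI) :: (fsplit cs).tail := by
  induction fuel with
  | zero => intro cs cur acc h; omega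
  | succ n ih =>
    intro cs cur acc h
    cases cs with
    | nil => simp [PySem.Chars.splitOn.go, fsplit]
    | cons c rest =>
      by_cases hc : c = '"'
      · subst hc
        have hstep : PySem.Chars.splitOn.go ['"'] (n+1) ('"' :: rest) cur acc
            = PySem.Chars.splitOn.go ['"'] n rest [] (cur.reverse :: acc) := by
          rw [PySem.Chars.splitOn.go]
          simp [List.isPrefixOf]
        rw [hstep, ih rest [] (cur.reverse :: acc) (by simpa using h)]
        simp [fsplit, fsplit_cons]
      · have hp : ['"'].isPrefixOf (c :: rest) = false := by
          simp [List.isPrefixOf]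
          exact fun hq => hc hq.symm
        have hstep : PySem.Chars.splitOn.go ['"'] (n+1) (c :: rest) cur acc
            = PySem.Chars.splitOn.go ['"'] n rest (c :: cur) acc := by
          rw [PySem.Chars.splitOn.go, if_neg (by simp [hp])]
        rw [hstep, ih rest (c :: cur) acc (by simpa using Nat.lt_of_succ_lt_succ h)]
        simp [fsplit, hc]

theorem splitOn_eq_fsplit (cs : List Char) : PySem.Chars.splitOn cs ['"'] = fsplit cs := by
  unfold PySem.Chars.splitOn
  rw [splitOn_go_eq (cs.length + 1) cs [] [] (Nat.lt_succ_self _)]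
  simpa using fsplit_cons cs

theorem count_go_eq (fuel : Nat) :
    ∀ (cs : List Char) (acc : Nat), cs.length ≤ fuel →
      PySem.Chars.count.go ['"'] fuel cs acc = acc + cs.count '"' := by
  induction fuel with
  | zero =>
    intro cs acc h
    have : cs = [] := List.length_eq_zero_iff.mp (Nat.le_zero.mp h)
    subst this; simp [PySem.Chars.count.go]
  | succ n ih =>
    intro cs acc h
    cases cs with
    | nil => simp [PySem.Chars.count.go]
    | cons c rest =>
      by_cases hc : c = '"'
      · subst hc
        have hstep : PySem.Chars.count.go ['"'] (n+1) ('"' :: rest) acc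
            = PySem.Chars.count.go ['"'] n rest (acc + 1) := by
          rw [PySem.Chars.count.go]
          simp [List.isPrefixOf]
        rw [hstep, ih rest (acc + 1) (by simpa using h)]
        simp [List.count_cons]
        omega
      · have hp : ['"'].isPrefixOf (c :: rest) = false := by
          simp [List.isPrefixOf]
          exact fun hq => hc hq.symm
        have hstep : PySem.Chars.count.go ['"'] (n+1) (c :: rest) acc
            = PySem.Chars.count.go ['"'] n rest acc := by
          rw [PySem.Chars.count.go, if_neg (by simp [hp])]
        rw [hstep, ih rest acc (by simpa using Nat.le_of_succ_le_succ h)]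
        simp [List.count_cons, hc]

theorem count_eq_count (cs : List Char) : PySem.Chars.count cs ['"'] = cs.count '"' := by
  unfold PySem.Chars.count
  rw [if_neg (by simp), count_go_eq cs.length cs 0 le_rfl]
  omega

theorem length_fsplit (cs : List Char) : (fsplit cs).length = cs.count '"' + 1 := by
  induction cs with
  | nil => simp [fsplit]
  | cons c rest ih =>
    by_cases hc : c = '"'
    · simp [fsplit, hc, List.count_cons, ih]
    · have h1 : (fsplit rest).tail.length + 1 = (fsplit rest).length := by
        conv_rhs => rw [← fsplit_cons rest]
        simp
      simp only [fsplit, if_neg hc, List.length_cons, List.count_cons]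
      rw [h1, ih]
      simp [hc]

-- A's loop over char-list pieces
def loopAc (pieces : List (List Char)) (pos : Bool) (parts : List (String × String)) :
    List (String × String) :=
  match pieces with
  | [] => parts
  | p :: ps =>
    let e := !pos
    if p = [] then
      if e = false then []
      else loopAc ps e parts
    else loopAc ps e (parts ++ [((if e then "verbatim" else "group"), String.ofList p)])

theorem ofList_eq_empty_iff (p : List Char) : String.ofList p = "" ↔ p = [] := by
  constructor
  · intro h
    have := congrArg String.toList h
    simpa using this
  · intro h; simp [h]

theorem loopA_map (ps : List (List Char)) :
    ∀ (pos : Bool) (parts : List (String × String)),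
      findquotesLoop (ps.map String.ofList) pos parts = loopAc ps pos parts := by
  induction ps with
  | nil => intro pos parts; simp [findquotesLoop, loopAc]
  | cons p l ih =>
    intro pos parts
    simp only [List.map_cons, findquotesLoop, loopAc]
    by_cases hp : p = []
    · simp [hp, ofList_eq_empty_iff, ih]
    · rw [if_neg (by simpa [ofList_eq_empty_iff] using hp),
        if_neg hp, ih]

-- 'the loop raises nowhere': every group-position piece is nonempty
def goodP : List (List Char) → Bool → Prop
  | [], _ => True
  | p :: ps, pos => (pos = true → p ≠ []) ∧ goodP ps (!pos)

theorem goodP_of_forall (ps : List (List Char)) :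
    ∀ (pos : Bool),
      (∀ i, i < ps.length → (i + (if pos then 1 else 0)) % 2 = 1 → ps.getD i [] ≠ []) →
      goodP ps pos := by
  induction ps with
  | nil => intro pos _; trivial
  | cons p l ih =>
    intro pos h
    constructor
    · intro hpos
      have := h 0 (by simp) (by simp [hpos])
      simpa using this
    · apply ih
      intro i hi hpar
      have := h (i + 1) (by simpa using Nat.succ_lt_succ hi)
        (by cases pos <;> simp_all <;> omega)
      simpa using this

-- the heart: the character scan equals A's loop on the remaining pieces, with the current
-- buffer prefixed onto the first remaining piece
theorem scan_eq_loop (cs : List Char) :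
    ∀ (inq : Bool) (buf : List Char) (parts : List (String × String)),
      goodP ((buf ++ (fsplit cs).headI) :: (fsplit cs).tail) inq →
      cs.count '"' % 2 = (if inq then 1 else 0) →
      altScan cs inq buf parts
        = loopAc ((buf ++ (fsplit cs).headI) :: (fsplit cs).tail) inq parts := by
  induction cs with
  | nil =>
    intro inq buf parts hg hc
    have hinq : inq = false := by
      cases inq
      · rfl
      · simp at hc
    subst hinq
    by_cases hb : buf = []
    · simp [altScan, loopAc, fsplit, hb]
    · simp [altScan, loopAc, fsplit, hb]
  | cons c rest ih =>
    intro inq buf parts hg hc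
    by_cases hcq : c = '"'
    · subst hcq
      have hsplit : fsplit ('"' :: rest) = [] :: fsplit rest := by simp [fsplit]
      rw [hsplit] at hg ⊢
      simp only [List.headI, List.tail, List.append_nil] at hg ⊢
      cases inq with
      | false =>
        have hcr : rest.count '"' % 2 = 1 := by
          simp [List.count_cons] at hc
          omega
        have hA : altScan ('"' :: rest) false buf parts
            = altScan rest true []
                (parts ++ if buf = [] then [] else [("verbatim", String.ofList buf)]) := by
          simp [altScan]
        have hG : goodP (([] ++ (fsplit rest).headI) :: (fsplit rest).tail) true := by
          simpa [fsplit_cons] using hg.2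
        rw [hA, ih true [] _ hG (by simpa using hcr)]
        have hR : loopAc (buf :: fsplit rest) false parts
            = loopAc (fsplit rest) true
                (parts ++ if buf = [] then [] else [("verbatim", String.ofList buf)]) := by
          by_cases hb : buf = [] <;> simp [loopAc, hb]
        rw [hR]
        conv_rhs => rw [← fsplit_cons rest]
        simp
      | true =>
        have hbuf : buf ≠ [] := hg.1 rfl
        have hcr : rest.count '"' % 2 = 0 := by
          simp [List.count_cons] at hc
          omega
        have hA : altScan ('"' :: rest) true buf parts
            = altScan rest false [] (parts ++ [("group", String.ofList buf)]) := by
          simp [altScan, hbuf]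
        have hG : goodP (([] ++ (fsplit rest).headI) :: (fsplit rest).tail) false := by
          simpa [fsplit_cons] using hg.2
        rw [hA, ih false [] _ hG (by simpa using hcr)]
        have hR : loopAc (buf :: fsplit rest) true parts
            = loopAc (fsplit rest) false (parts ++ [("group", String.ofList buf)]) := by
          simp [loopAc, hbuf]
        rw [hR]
        conv_rhs => rw [← fsplit_cons rest]
        simp
    · have hsplit : fsplit (c :: rest) = (c :: (fsplit rest).headI) :: (fsplit rest).tail := by
        simp [fsplit, hcq]
      rw [hsplit] at hg ⊢
      have hcr : rest.count '"' % 2 = (if inq then 1 else 0) := by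
        simpa [List.count_cons, hcq] using hc
      have hA : altScan (c :: rest) inq buf parts = altScan rest inq (buf ++ [c]) parts := by
        simp [altScan, hcq]
      rw [hA, ih inq (buf ++ [c]) parts (by simpa using hg) hcr]
      simp

-- ===== VERDICT (by name: the statement is the Claim_ definition above) =====
theorem findquotes_spec : Claim_equal_findquotes := by
  intro text _ hpre
  unfold Spec_findquotes
  by_cases ht : text = ""
  · simp [findquotes, findquotes_alt, ht]
  · have hsplit : PySem.Str.split? text "\"" = some ((fsplit text.toList).map String.ofList) := by
      simp only [PySem.Str.split?]
      have : PySem.Chars.split? text.toList ['"'] = some (fsplit text.toList) := by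
        simp [PySem.Chars.split?, splitOn_eq_fsplit]
      simpa [this] using rfl
    unfold Pre_findquotes at hpre
    rw [hsplit] at hpre
    simp only [Option.getD_some] at hpre
    obtain ⟨hlen, hodd⟩ := hpre
    have hlen' : (fsplit text.toList).length % 2 = 1 := by simpa using hlen
    have hcount : text.toList.count '"' % 2 = 0 := by
      have := length_fsplit text.toList
      omega
    have hcountS : PySem.Str.count text "\"" = text.toList.count '"' := by
      simpa [PySem.Str.count] using count_eq_count text.toList
    -- A's side
    have hAeq : findquotes text
        = findquotesLoop ((fsplit text.toList).map String.ofList) false [] := by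
      simp only [findquotes, if_neg ht, hsplit, Option.getD_some]
      rw [if_neg (by simpa using hlen)]
    rw [hAeq]
    -- B's side
    rw [findquotes_alt, if_neg ht, hcountS, if_neg (by omega)]
    -- bridge
    rw [loopA_map]
    have hgood : goodP (fsplit text.toList) false := by
      apply goodP_of_forall
      intro i hi hpar
      have hmem : i ∈ List.range ((fsplit text.toList).map String.ofList).length := by
        simp [List.mem_range]; simpa using hi
      have := hodd i hmem (by simpa using hpar)
      intro hnil
      apply this
      have hnil' : (fsplit text.toList)[i] = [] := by
        rwa [List.getD_eq_getElem?_getD, List.getElem?_eq_getElem hi, Option.getD_some] at hnil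
      rw [List.getD_eq_getElem?_getD, List.getElem?_map, List.getElem?_eq_getElem hi]
      simp [hnil']
    rw [scan_eq_loop text.toList false [] []
      (by simpa [fsplit_cons] using hgood) (by simpa using hcount)]
    simp [fsplit_cons]
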